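-- pv_equiv track=rewrite | github.com/menatsagar/DSA | Sliding Window/subarray_with_given_sum_sw.py | check_subarray_with_given_sum_and_length
-- ===== SOURCE A (Python) =====
-- def check_subarray_with_given_sum_and_length(arr, k, target):
--
--     n = len(arr)
--     window_sum = 0
--
--     for i in range(k):
--         window_sum += arr[i]
--
--     if window_sum == target:
--         return 1
--
--     for i in range(1, n-k+1):
--
--         window_sum += arr[i+k-1] - arr[i-1]
--
--         if window_sum == target:
--             return 1
--
--     return 0
-- ===== SOURCE B (Python) =====
-- def check_subarray_with_given_sum_and_length(arr, k, target):
--     n = len(arr)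
--     prefix = [0]
--     for x in arr:
--         prefix.append(prefix[-1] + x)
--     for i in range(n - k + 1):
--         if prefix[i + k] - prefix[i] == target:
--             return 1
--     return 0
-- ===== Notes on version B (the rewrite author's own statement) =====
-- stated objective: alternative
-- what changed: B precomputes a prefix-sum list once and tests each window as a difference of two prefix sums in a single uniform scan, instead of A's running window sum that is seeded by a separate first loop and then slid with add/subtract updates.
-- outside the precondition, e.g. on check_subarray_with_given_sum_and_length([1, 2], -1, 1): A returns 1, B raises IndexError; on check_subarray_with_given_sum_and_length([1], 2, 0): A raises IndexError, B returns 0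
import Mathlib
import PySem

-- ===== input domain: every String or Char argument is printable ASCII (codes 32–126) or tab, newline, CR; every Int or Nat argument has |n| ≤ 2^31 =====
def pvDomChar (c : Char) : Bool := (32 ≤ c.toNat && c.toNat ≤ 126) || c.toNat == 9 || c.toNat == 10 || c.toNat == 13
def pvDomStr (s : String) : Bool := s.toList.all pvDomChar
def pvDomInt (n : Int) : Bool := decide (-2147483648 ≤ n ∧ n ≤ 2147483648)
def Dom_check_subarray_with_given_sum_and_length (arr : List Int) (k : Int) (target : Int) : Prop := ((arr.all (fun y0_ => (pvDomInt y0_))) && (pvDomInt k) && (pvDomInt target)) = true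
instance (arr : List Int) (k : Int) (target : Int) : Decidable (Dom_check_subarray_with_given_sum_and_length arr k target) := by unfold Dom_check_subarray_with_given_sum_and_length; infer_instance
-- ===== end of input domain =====

-- B replaces A's slide-and-update running window sum by a prefix-sum list queried per window
-- (alternative decomposition, same O(n) cost); equivalence is claimed on 0 ≤ k ≤ len(arr).

-- ===== PORT A =====
-- A's second for-loop with its early `return 1`, threading the running window_sum.
def pvLoopA (arr : List Int) (k target : Int) : List Int → Int → Int
  | [], _ws => 0
  | i :: rest, ws =>
    let ws2 := ws + PySem.List.pyGetD arr (i + k - 1) 0 - PySem.List.pyGetD arr (i - 1) 0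
    if ws2 = target then 1 else pvLoopA arr k target rest ws2

def check_subarray_with_given_sum_and_length (arr : List Int) (k : Int) (target : Int) : Int :=
  let n : Int := arr.length
  let window_sum := (PySem.List.pyRange 0 k 1).foldl (fun s i => s + PySem.List.pyGetD arr i 0) 0
  if window_sum = target then 1
  else pvLoopA arr k target (PySem.List.pyRange 1 (n - k + 1) 1) window_sum

-- ===== PORT B =====
-- B's search loop with its early `return 1`: window i is prefix[i+k] - prefix[i].
def pvLoopB (pfx : List Int) (k target : Int) : List Int → Int
  | [] => 0
  | i :: rest =>
    if PySem.List.pyGetD pfx (i + k) 0 - PySem.List.pyGetD pfx i 0 = target then 1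
    else pvLoopB pfx k target rest

def check_subarray_with_given_sum_and_length_alt (arr : List Int) (k : Int) (target : Int) : Int :=
  let n : Int := arr.length
  let pfx := arr.foldl (fun p x => p ++ [PySem.List.pyGetD p (-1) 0 + x]) [0]
  pvLoopB pfx k target (PySem.List.pyRange 0 (n - k + 1) 1)

-- ===== PRECONDITION & SPEC =====
-- Pre_ excludes k > len(arr), where A raises IndexError in its first loop, and k < 0, where
-- A's values arise from accidental negative-index wraparound and B may raise there.
def Pre_check_subarray_with_given_sum_and_length (arr : List Int) (k : Int) (target : Int) : Prop :=
  0 ≤ k ∧ k ≤ (arr.length : Int)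
instance (arr : List Int) (k : Int) (target : Int) : Decidable (Pre_check_subarray_with_given_sum_and_length arr k target) := by unfold Pre_check_subarray_with_given_sum_and_length; infer_instance

def pvWitness_check_subarray_with_given_sum_and_length : List Int × Int × Int := ([1, 2, 3], 2, 5)

def Spec_check_subarray_with_given_sum_and_length (arr : List Int) (k : Int) (target : Int) (out : Int) : Prop := out = check_subarray_with_given_sum_and_length_alt arr k target
instance (arr : List Int) (k : Int) (target : Int) (out : Int) : Decidable (Spec_check_subarray_with_given_sum_and_length arr k target out) := by unfold Spec_check_subarray_with_given_sum_and_length; infer_instance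

-- ===== CLAIM (what is proved, stated in full; the proofs are below) =====
def Claim_equal_check_subarray_with_given_sum_and_length : Prop := ∀ (arr : List Int) (k : Int) (target : Int), Dom_check_subarray_with_given_sum_and_length arr k target → Pre_check_subarray_with_given_sum_and_length arr k target → Spec_check_subarray_with_given_sum_and_length arr k target (check_subarray_with_given_sum_and_length arr k target)

-- ===== LEMMAS AND PROOFS =====

-- P arr p = sum of the first p elements.
def pvP (arr : List Int) (p : ℕ) : Int := (arr.take p).sum

theorem pvP_succ (arr : List Int) (p : ℕ) (h : p < arr.length) :
    pvP arr (p + 1) = pvP arr p + arr.getD p 0 := by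
  unfold pvP
  rw [List.take_succ, List.sum_append, List.getElem?_eq_getElem h]
  simp [List.getD, List.getElem?_eq_getElem h]

-- B's prefix build equals List.scanl (·+·).
theorem pvBuild_eq (l : List Int) : ∀ (q : List Int) (s : Int),
    l.foldl (fun p x => p ++ [PySem.List.pyGetD p (-1) 0 + x]) (q ++ [s])
      = q ++ List.scanl (· + ·) s l := by
  induction l with
  | nil => intro q s; simp [List.scanl]
  | cons x l ih =>
    intro q s
    simp only [List.foldl_cons, List.scanl]
    rw [PySem.List.pyGetD_neg_one_append_singleton]
    have := ih (q ++ [s]) (s + x)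
    simpa using this

theorem pvScanl_getD (l : List Int) : ∀ (s : Int) (i : ℕ), i ≤ l.length →
    (List.scanl (· + ·) s l).getD i 0 = s + (l.take i).sum := by
  induction l with
  | nil =>
    intro s i h
    have hi : i = 0 := by simpa using h
    subst hi; simp [List.scanl]
  | cons x l ih =>
    intro s i h
    cases i with
    | zero => simp [List.scanl]
    | succ i =>
      rw [List.scanl_cons, List.getD_cons_succ, ih (s + x) i (by simpa using h)]
      simp [add_assoc]

-- A's first loop sums the first m elements.
theorem pvSumRange (arr : List Int) : ∀ (m : ℕ), m ≤ arr.length → ∀ (c : Int),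
    (PySem.List.pyRange 0 (m : Int) 1).foldl (fun s i => s + PySem.List.pyGetD arr i 0) c
      = c + pvP arr m := by
  intro m
  induction m with
  | zero => intro _ c; simp [PySem.List.pyRange_one_eq_nil, pvP]
  | succ m ih =>
    intro h c
    have h1 : ((m : Int) + 1 : Int) = ((m + 1 : ℕ) : Int) := by push_cast; ring
    rw [← h1, PySem.List.pyRange_one_succ_right (by positivity), List.foldl_append,
        ih (by omega) c]
    simp only [List.foldl_cons, List.foldl_nil]
    rw [PySem.List.pyGetD_natCast, pvP_succ arr m (by omega)]
    ring

theorem pvGetD_scanl (arr : List Int) (j : Int) (h0 : 0 ≤ j) (h1 : j ≤ (arr.length : Int)) :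
    PySem.List.pyGetD (List.scanl (· + ·) (0 : Int) arr) j 0 = pvP arr j.toNat := by
  rw [show j = ((j.toNat : ℕ) : Int) from (Int.toNat_of_nonneg h0).symm,
      PySem.List.pyGetD_natCast, pvScanl_getD arr 0 j.toNat (by omega)]
  rw [zero_add]
  simp only [pvP, Int.toNat_natCast]

-- the main loop correspondence, by induction on the remaining range length
theorem pvLoop_eq (arr : List Int) (k target : Int) (hk0 : 0 ≤ k) (hkn : k ≤ (arr.length : Int)) :
    ∀ (d : ℕ) (a : Int), 1 ≤ a → d = (((arr.length : Int) - k + 1) - a).toNat →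
    ∀ ws, ws = pvP arr (a - 1 + k).toNat - pvP arr (a - 1).toNat →
    pvLoopA arr k target (PySem.List.pyRange a ((arr.length : Int) - k + 1) 1) ws
      = pvLoopB (List.scanl (· + ·) 0 arr) k target
          (PySem.List.pyRange a ((arr.length : Int) - k + 1) 1) := by
  intro d
  induction d with
  | zero =>
    intro a _ hd ws _
    rw [PySem.List.pyRange_one_eq_nil (by omega)]
    simp [pvLoopA, pvLoopB]
  | succ d ih =>
    intro a ha hd ws hws
    by_cases hlt : a < (arr.length : Int) - k + 1
    · rw [PySem.List.pyRange_one_cons hlt]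
      simp only [pvLoopA, pvLoopB]
      have hbound : a + k ≤ (arr.length : Int) := by omega
      -- the updated running sum is the window sum at a
      have hstep : ws + PySem.List.pyGetD arr (a + k - 1) 0 - PySem.List.pyGetD arr (a - 1) 0
          = pvP arr (a + k).toNat - pvP arr a.toNat := by
        rw [show a + k - 1 = (((a + k - 1).toNat : ℕ) : Int) from (Int.toNat_of_nonneg (by omega)).symm,
            show a - 1 = (((a - 1).toNat : ℕ) : Int) from (Int.toNat_of_nonneg (by omega)).symm,
            PySem.List.pyGetD_natCast, PySem.List.pyGetD_natCast]
        have e1 : pvP arr (a + k).toNat = pvP arr ((a + k - 1).toNat) + arr.getD (a + k - 1).toNat 0 := by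
          rw [show (a + k).toNat = (a + k - 1).toNat + 1 by omega]
          exact pvP_succ arr _ (by omega)
        have e2 : pvP arr a.toNat = pvP arr ((a - 1).toNat) + arr.getD (a - 1).toNat 0 := by
          rw [show a.toNat = (a - 1).toNat + 1 by omega]
          exact pvP_succ arr _ (by omega)
        have e3 : (a - 1 + k).toNat = (a + k - 1).toNat := by omega
        rw [hws, e3, e1, e2]; ring
      have hB1 : PySem.List.pyGetD (List.scanl (· + ·) (0 : Int) arr) (a + k) 0
          = pvP arr (a + k).toNat := pvGetD_scanl arr (a + k) (by omega) hbound
      have hB2 : PySem.List.pyGetD (List.scanl (· + ·) (0 : Int) arr) a 0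
          = pvP arr a.toNat := pvGetD_scanl arr a (by omega) (by omega)
      rw [hstep, hB1, hB2]
      split_ifs with hhit
      · rfl
      · exact ih (a + 1) (by omega) (by omega) (pvP arr (a + k).toNat - pvP arr a.toNat)
          (by rw [show a + 1 - 1 + k = a + k by ring, show a + 1 - 1 = a by ring])
    · rw [PySem.List.pyRange_one_eq_nil (by omega)]
      simp [pvLoopA, pvLoopB]

-- ===== VERDICT (by name: the statement is the Claim_ definition above) =====
theorem check_subarray_with_given_sum_and_length_spec : Claim_equal_check_subarray_with_given_sum_and_length := by
  intro arr k target _hdom hpre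
  obtain ⟨hk0, hkn⟩ := hpre
  unfold Spec_check_subarray_with_given_sum_and_length
  unfold check_subarray_with_given_sum_and_length check_subarray_with_given_sum_and_length_alt
  simp only []
  -- the prefix list is scanl
  have hpfx : arr.foldl (fun p x => p ++ [PySem.List.pyGetD p (-1) 0 + x]) [0]
      = List.scanl (· + ·) (0 : Int) arr := by
    have := pvBuild_eq arr [] 0
    simpa using this
  -- the first window sum
  have hws : (PySem.List.pyRange 0 k 1).foldl (fun s i => s + PySem.List.pyGetD arr i 0) 0
      = pvP arr k.toNat := by
    rw [show k = ((k.toNat : ℕ) : Int) from (Int.toNat_of_nonneg hk0).symm,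
        pvSumRange arr k.toNat (by omega) 0]
    rw [zero_add]
    congr 1
  rw [hpfx, hws]
  -- split off the first element of B's range
  rw [PySem.List.pyRange_one_cons (show (0:Int) < (arr.length : Int) - k + 1 by omega)]
  simp only [pvLoopB, zero_add]
  rw [pvGetD_scanl arr k hk0 hkn,
      pvGetD_scanl arr 0 le_rfl (by positivity)]
  have hP0 : pvP arr (0 : Int).toNat = 0 := by simp [pvP]
  rw [hP0, sub_zero]
  split_ifs with h
  · rfl
  · refine pvLoop_eq arr k target hk0 hkn _ 1 le_rfl rfl _ ?_
    rw [show (1:Int) - 1 + k = k by ring, show ((1:Int) - 1).toNat = 0 by omega]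
    simp [pvP]
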